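-- pv_equiv track=rewrite | github.com/msjtw/cpp | advent_of_code_2023/day14/part1.py | press
-- ===== SOURCE A (Python) =====
-- def Reverse(tup):
--     new_tup = tup[::-1]
--     return new_tup
--
-- def press(arr):
--     res = 0
--     arr = list(zip(*arr[::-1]))
--
--     for i in range(len(arr)):
--         arr[i] = Reverse(arr[i])
--
--     for line in arr:
--         l = len(line)
--         l2 = l
--         for c in line:
--             if c == 'O':
--                 res += l
--                 l-=1
--             elif c == '#':
--                 l = l2-1
--             l2 -= 1
--     return res
-- ===== SOURCE B (Python) =====
-- def _column_load(n, col):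
--     # closed form per maximal inter-'#' segment: k rocks starting at slot `start`
--     # contribute k*(n-start) - k*(k-1)//2
--     load = 0
--     start = 0
--     rocks = 0
--     i = 0
--     for c in col:
--         if c == '#':
--             load += rocks * (n - start) - rocks * (rocks - 1) // 2
--             start = i + 1
--             rocks = 0
--         elif c == 'O':
--             rocks += 1
--         i += 1
--     return load + rocks * (n - start) - rocks * (rocks - 1) // 2
--
-- def press(arr):
--     n = len(arr)
--     width = min((len(row) for row in arr), default=0)
--     return sum(_column_load(n, [row[j] for row in arr]) for j in range(width))
-- ===== Notes on version B (the rewrite author's own statement) =====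
-- stated objective: alternative
-- what changed: B drops A's zip-transpose and per-rock decrementing scan: it reads each column directly from the rows and computes the load of every maximal inter-'#' segment with the arithmetic-series closed form rocks*(n-start) - rocks*(rocks-1)//2.
import Mathlib
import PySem

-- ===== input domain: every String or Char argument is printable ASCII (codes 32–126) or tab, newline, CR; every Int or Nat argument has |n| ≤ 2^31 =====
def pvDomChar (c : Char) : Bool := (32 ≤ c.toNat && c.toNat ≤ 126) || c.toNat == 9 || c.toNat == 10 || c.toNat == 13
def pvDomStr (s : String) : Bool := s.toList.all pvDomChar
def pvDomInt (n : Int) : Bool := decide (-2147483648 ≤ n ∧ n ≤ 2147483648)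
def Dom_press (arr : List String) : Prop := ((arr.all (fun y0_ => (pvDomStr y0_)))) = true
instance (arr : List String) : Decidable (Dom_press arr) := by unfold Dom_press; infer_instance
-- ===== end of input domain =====

-- B replaces A's transpose-and-decrement scan by a per-column segment scan with the
-- arithmetic-series closed form for each maximal inter-'#' segment (objective: alternative).

-- ===== PORT A =====

-- helper Reverse(tup): tup[::-1] is list reversal
def pressReverse (t : List Char) : List Char := t.reverse

-- termination helpers for zipStar (cited by its decreasing_by)
theorem zipStar_sum_tail_le (rows : List (List Char)) :
    ((rows.map List.tail).map List.length).sum ≤ (rows.map List.length).sum := by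
  induction rows with
  | nil => simp
  | cons r rs ih =>
      simp only [List.map_cons, List.sum_cons]
      have : r.tail.length ≤ r.length := by
        cases r <;> simp
      omega

theorem zipStar_dec (r : List Char) (rs : List (List Char)) (hr : r.isEmpty = false) :
    (((r :: rs).map List.tail).map List.length).sum < ((r :: rs).map List.length).sum := by
  have h1 := zipStar_sum_tail_le rs
  have h2 : r.tail.length < r.length := by
    cases r with
    | nil => simp at hr
    | cons a t => simp
  simp only [List.map_cons, List.sum_cons]
  omega

-- zip(*rows): take heads while every iterator is nonempty (zip() of no iterables is empty)
def zipStar (rows : List (List Char)) : List (List Char) :=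
  match h : rows with
  | [] => []
  | r :: rs =>
      if he : r.isEmpty || rs.any (fun x => x.isEmpty) then []
      else (rows.map (fun x => x.headD ' ')) :: zipStar (rows.map List.tail)
termination_by (rows.map List.length).sum
decreasing_by
  subst h
  simp only [List.map_subtype, List.unattach_attach]
  exact zipStar_dec r rs (by simp only [Bool.or_eq_true] at he; simp at he ⊢; exact he.1)

-- inner-loop body of A's "for c in line" (state: res, l, l2)
def stepA (st : Int × Int × Int) (c : Char) : Int × Int × Int :=
  if c = 'O' then (st.1 + st.2.1, st.2.1 - 1, st.2.2 - 1)
  else if c = '#' then (st.1, st.2.2 - 1, st.2.2 - 1)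
  else (st.1, st.2.1, st.2.2 - 1)

def press (arr : List String) : Int :=
  -- arr = list(zip(*arr[::-1]))  (strings iterate as chars)
  let arrT := zipStar ((arr.reverse).map (fun s => s.toList))
  -- for i in range(len(arr)): arr[i] = Reverse(arr[i])
  let arrT := arrT.map (fun t => pressReverse t)
  -- for line in arr: inner rolling scan
  arrT.foldl (fun res line =>
    (line.foldl stepA (res, (line.length : Int), (line.length : Int))).1) 0

-- ===== PORT B =====

-- min((len(row) for row in arr), default=0)
def minLen (rows : List (List Char)) : Nat :=
  match rows with
  | [] => 0
  | r :: rs => rs.foldl (fun m s => min m s.length) r.length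

-- rocks * (n - start) - rocks * (rocks - 1) // 2
def segLoad (n start rocks : Int) : Int :=
  rocks * (n - start) - PySem.Int.floordiv (rocks * (rocks - 1)) 2

-- loop body of _column_load's "for c in col" (state: load, start, rocks, i)
def stepB (n : Int) (s : Int × Int × Int × Int) (c : Char) : Int × Int × Int × Int :=
  if c = '#' then (s.1 + segLoad n s.2.1 s.2.2.1, s.2.2.2 + 1, 0, s.2.2.2 + 1)
  else if c = 'O' then (s.1, s.2.1, s.2.2.1 + 1, s.2.2.2 + 1)
  else (s.1, s.2.1, s.2.2.1, s.2.2.2 + 1)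

-- _column_load(n, col)
def columnLoad (n : Int) (col : List Char) : Int :=
  let f := col.foldl (stepB n) (0, 0, 0, 0)
  f.1 + segLoad n f.2.1 f.2.2.1

def press_alt (arr : List String) : Int :=
  let n : Int := arr.length
  let width := minLen (arr.map (fun s => s.toList))
  -- row[j]: exact, since j < width ≤ len(row); getD's default is never used
  (List.range width).foldl
    (fun total j => total + columnLoad n (arr.map (fun r => r.toList.getD j ' '))) 0

-- ===== PRECONDITION & SPEC =====
def Spec_press (arr : List String) (out : Int) : Prop := out = press_alt arr
instance (arr : List String) (out : Int) : Decidable (Spec_press arr out) := by unfold Spec_press; infer_instance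

-- ===== CLAIM (what is proved, stated in full; the proofs are below) =====
def Claim_equal_press : Prop := ∀ (arr : List String), Dom_press arr → Spec_press arr (press arr)

-- ===== LEMMAS AND PROOFS =====

theorem foldl_min_swap (xs : List Nat) (a x : Nat) :
    xs.foldl min (min a x) = min (xs.foldl min a) x := by
  induction xs generalizing a with
  | nil => simp
  | cons y ys ih =>
      simp only [List.foldl_cons]
      have h : min (min a x) y = min (min a y) x := by omega
      rw [h, ih]

-- natMin over a Nat list (proof-side mirror of minLen)
def minLenNat (ls : List Nat) : Nat :=
  match ls with
  | [] => 0
  | a :: t => t.foldl min a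

theorem minLen_eq (rows : List (List Char)) : minLen rows = minLenNat (rows.map List.length) := by
  cases rows with
  | nil => rfl
  | cons r rs => simp [minLen, minLenNat, List.foldl_map]

theorem foldl_min_eq_min (b : Nat) (t' : List Nat) (a : Nat) :
    (b :: t').foldl min a = min (minLenNat (b :: t')) a := by
  simp only [List.foldl_cons, minLenNat]
  rw [show min a b = min b a by omega, foldl_min_swap]

theorem minLenNat_append_singleton (ls : List Nat) (x : Nat) :
    minLenNat (ls ++ [x]) = if ls = [] then x else min (minLenNat ls) x := by
  cases ls with
  | nil => simp [minLenNat]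
  | cons a t =>
      rw [if_neg (by simp)]
      simp only [List.cons_append, minLenNat, List.foldl_append, List.foldl_cons, List.foldl_nil]

theorem minLenNat_reverse (ls : List Nat) : minLenNat ls.reverse = minLenNat ls := by
  induction ls with
  | nil => rfl
  | cons a t ih =>
      rw [List.reverse_cons, minLenNat_append_singleton]
      cases t with
      | nil => simp [minLenNat]
      | cons b t' =>
          rw [if_neg (by simp), ih]
          exact (foldl_min_eq_min b t' a).symm

theorem minLen_reverse (rows : List (List Char)) : minLen rows.reverse = minLen rows := by
  rw [minLen_eq, minLen_eq, List.map_reverse, minLenNat_reverse]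

theorem foldl_min_le_init (xs : List Nat) (a : Nat) : xs.foldl min a ≤ a := by
  induction xs generalizing a with
  | nil => simp
  | cons y ys ih => exact le_trans (ih _) (by omega)

theorem foldl_min_le_mem (xs : List Nat) (a x : Nat) (hx : x ∈ xs) : xs.foldl min a ≤ x := by
  induction xs generalizing a with
  | nil => simp at hx
  | cons y ys ih =>
      simp only [List.foldl_cons]
      rcases List.mem_cons.mp hx with h | h
      · subst h; exact le_trans (foldl_min_le_init _ _) (by omega)
      · exact ih _ h

theorem minLen_zero_of_empty (rows : List (List Char)) (r : List Char)
    (hr : r ∈ rows) (he : r = []) : minLen rows = 0 := by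
  cases rows with
  | nil => rfl
  | cons a t =>
      simp only [minLen] at *
      rw [show (fun (m : Nat) (s : List Char) => min m s.length) = (fun m s => min m s.length) from rfl]
      rcases List.mem_cons.mp hr with h | h
      · have ha : a.length = 0 := by rw [← h, he]; rfl
        have := foldl_min_le_init (t.map List.length) a.length
        have h2 : t.foldl (fun m s => min m s.length) a.length = (t.map List.length).foldl min a.length := by
          rw [List.foldl_map]
        omega
      · have hx : (0:Nat) ∈ t.map List.length := by
          exact List.mem_map.mpr ⟨r, h, by rw [he]; rfl⟩
        have := foldl_min_le_mem (t.map List.length) a.length 0 hx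
        have h2 : t.foldl (fun m s => min m s.length) a.length = (t.map List.length).foldl min a.length := by
          rw [List.foldl_map]
        omega

theorem getD_succ_tail (r : List Char) (j : Nat) : r.getD (j+1) ' ' = r.tail.getD j ' ' := by
  cases r <;> simp

theorem getD_zero_headD (r : List Char) : r.headD ' ' = r.getD 0 ' ' := by
  cases r <;> simp

theorem minLen_tail (r : List Char) (rs : List (List Char)) :
    minLen ((r :: rs).map List.tail) = minLen (r :: rs) - 1 := by
  simp only [minLen, List.map_cons, List.foldl_map]
  have key : ∀ (xs : List (List Char)) (a : Nat),
      xs.foldl (fun m s => min m s.tail.length) (a - 1) = xs.foldl (fun m s => min m s.length) a - 1 := by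
    intro xs
    induction xs with
    | nil => intro a; rfl
    | cons y ys ih =>
        intro a
        simp only [List.foldl_cons]
        rw [← ih]
        congr 1
        have : y.tail.length = y.length - 1 := by cases y <;> simp
        omega
  have hr : r.tail.length = r.length - 1 := by cases r <;> simp
  rw [hr]
  exact key rs r.length

theorem foldl_min_pos (xs : List Nat) (a : Nat) (ha : 0 < a) (hx : ∀ x ∈ xs, 0 < x) :
    0 < xs.foldl min a := by
  induction xs generalizing a with
  | nil => simpa
  | cons y ys ih =>
      simp only [List.foldl_cons]
      exact ih _ (by have := hx y (by simp); omega) (fun x hx' => hx x (by simp [hx']))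

theorem minLen_pos (rows : List (List Char)) (hne : rows ≠ [])
    (hall : ∀ r ∈ rows, r ≠ []) : 0 < minLen rows := by
  cases rows with
  | nil => exact absurd rfl hne
  | cons r rs =>
      have hr : 0 < r.length := List.length_pos_iff.mpr (hall r (by simp))
      have : rs.foldl (fun m s => min m s.length) r.length = (rs.map List.length).foldl min r.length := by
        rw [List.foldl_map]
      rw [minLen, this]
      exact foldl_min_pos _ _ hr (fun x hx => by
        rcases List.mem_map.mp hx with ⟨s, hs, rfl⟩
        exact List.length_pos_iff.mpr (hall s (by simp [hs])))

theorem zipStar_eq (rows : List (List Char)) :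
    zipStar rows = (List.range (minLen rows)).map (fun j => rows.map (fun r => r.getD j ' ')) := by
  induction hm : minLen rows using Nat.strong_induction_on generalizing rows with
  | _ m ih =>
  cases rows with
  | nil => subst hm; simp [zipStar, minLen]
  | cons r rs =>
      by_cases he : r.isEmpty || rs.any (fun x => x.isEmpty)
      · -- some row is empty: m = 0
        have hm0 : minLen (r :: rs) = 0 := by
          rcases Bool.or_eq_true _ _ |>.mp he with h | h
          · exact minLen_zero_of_empty _ r (by simp) (List.isEmpty_iff.mp h)
          · rcases List.any_eq_true.mp h with ⟨x, hx, hxe⟩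
            exact minLen_zero_of_empty _ x (by simp [hx]) (List.isEmpty_iff.mp hxe)
        rw [zipStar, dif_pos he]
        rw [hm0] at hm
        subst hm
        rfl
      · -- all rows nonempty
        have hall : ∀ x ∈ r :: rs, x ≠ [] := by
          intro x hx
          simp only [Bool.or_eq_true, not_or] at he
          rcases List.mem_cons.mp hx with h | h
          · subst h; simpa [List.isEmpty_iff] using he.1
          · intro hxe
            exact he.2 (List.any_eq_true.mpr ⟨x, h, by rw [hxe]; rfl⟩)
        have hpos : 0 < minLen (r :: rs) := minLen_pos _ (by simp) hall
        have htail : minLen ((r :: rs).map List.tail) = m - 1 := by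
          rw [minLen_tail, hm]
        rw [zipStar, dif_neg he]
        rw [ih (m - 1) (by omega) _ htail]
        have hm' : m = (m - 1) + 1 := by omega
        rw [hm', List.range_succ_eq_map]
        simp only [List.map_cons, List.map_map]
        congr 1
        · -- heads
          simp only [getD_zero_headD]
        · apply List.map_congr_left
          intro j _
          simp only [Function.comp_apply]
          congr 1
          · exact (getD_succ_tail r j).symm
          · apply List.map_congr_left
            intro x _
            exact (getD_succ_tail x j).symm

theorem segLoad_zero (n p : Int) : segLoad n p 0 = 0 := by
  simp [segLoad, PySem.Int.floordiv]

theorem segLoad_succ (n p k : Int) : segLoad n p (k + 1) = segLoad n p k + (n - p - k) := by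
  obtain ⟨c, hc⟩ : ∃ c, k * (k - 1) = 2 * c := by
    rcases Int.even_mul_succ_self (k - 1) with ⟨c, hc⟩
    exact ⟨c, by linear_combination hc⟩
  have h3 : (k + 1) * k = 2 * (c + k) := by linear_combination hc
  simp only [segLoad, PySem.Int.floordiv_eq_ediv_of_pos (show (0:Int) < 2 by norm_num)]
  rw [show (k + 1) * (k + 1 - 1) = 2 * (c + k) by linear_combination hc, hc,
    Int.mul_ediv_cancel_left _ (by norm_num), Int.mul_ediv_cancel_left _ (by norm_num)]
  ring

theorem colMain (cs : List Char) (n : Int) :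
    ∀ (p k t res : Int),
    (cs.foldl stepA (res, n - p - k, (cs.length : Int))).1
    = res + (cs.foldl (stepB n) (t, p, k, n - (cs.length : Int))).1
        + segLoad n (cs.foldl (stepB n) (t, p, k, n - (cs.length : Int))).2.1
            (cs.foldl (stepB n) (t, p, k, n - (cs.length : Int))).2.2.1
        - (t + segLoad n p k) := by
  induction cs with
  | nil => intro p k t res; simp
  | cons c cs ih =>
      intro p k t res
      simp only [List.foldl_cons, List.length_cons, Nat.cast_add, Nat.cast_one]
      by_cases hO : c = 'O'
      · subst hO
        simp only [stepA, stepB, reduceIte, if_neg (by decide : ¬('O' = '#'))]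
        have e1 : ((res + (n - p - k) : Int), n - p - k - 1, (cs.length : Int) + 1 - 1)
            = ((res + (n - p - k) : Int), n - p - (k + 1), (cs.length : Int)) := by
          simp only [Prod.mk.injEq]
          and_intros <;> first | trivial | ring
        have e2 : ((t : Int), p, k + 1, n - ((cs.length : Int) + 1) + 1)
            = ((t : Int), p, k + 1, n - (cs.length : Int)) := by
          simp only [Prod.mk.injEq]
          and_intros <;> first | trivial | ring
        rw [e1, e2, ih p (k + 1) t (res + (n - p - k)), segLoad_succ]
        ring
      · by_cases hH : c = '#'
        · subst hH
          simp only [stepA, stepB, reduceIte, if_neg (by decide : ¬('#' = 'O'))]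
          have e1 : ((res : Int), (cs.length : Int) + 1 - 1, (cs.length : Int) + 1 - 1)
              = ((res : Int), n - (n - ((cs.length : Int) + 1) + 1) - 0, (cs.length : Int)) := by
            simp only [Prod.mk.injEq]
            and_intros <;> first | trivial | ring
          have e2 : ((t + segLoad n p k : Int), n - ((cs.length : Int) + 1) + 1, (0 : Int),
                n - ((cs.length : Int) + 1) + 1)
              = ((t + segLoad n p k : Int), n - ((cs.length : Int) + 1) + 1, (0 : Int),
                n - (cs.length : Int)) := by
            simp only [Prod.mk.injEq]
            and_intros <;> first | trivial | ring
          rw [e1, e2, ih (n - ((cs.length : Int) + 1) + 1) 0 (t + segLoad n p k) res, segLoad_zero]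
          ring
        · simp only [stepA, stepB, if_neg hO, if_neg hH]
          have e1 : ((res : Int), n - p - k, (cs.length : Int) + 1 - 1)
              = ((res : Int), n - p - k, (cs.length : Int)) := by
            simp only [Prod.mk.injEq]
            and_intros <;> first | trivial | ring
          have e2 : ((t : Int), p, k, n - ((cs.length : Int) + 1) + 1)
              = ((t : Int), p, k, n - (cs.length : Int)) := by
            simp only [Prod.mk.injEq]
            and_intros <;> first | trivial | ring
          rw [e1, e2]
          exact ih p k t res

theorem colEq (arr : List String) (res : Int) (j : Nat) :
    ((arr.map (fun r => r.toList.getD j ' ')).foldl stepA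
      (res, ((arr.map (fun r => r.toList.getD j ' ')).length : Int),
        ((arr.map (fun r => r.toList.getD j ' ')).length : Int))).1
    = res + columnLoad (arr.length : Int) (arr.map (fun r => r.toList.getD j ' ')) := by
  have hlen : ((arr.map (fun r => r.toList.getD j ' ')).length : Int) = (arr.length : Int) := by
    simp
  rw [show ((res : Int), ((arr.map (fun r => r.toList.getD j ' ')).length : Int),
        ((arr.map (fun r => r.toList.getD j ' ')).length : Int))
      = ((res : Int), (arr.length : Int) - 0 - 0,
        ((arr.map (fun r => r.toList.getD j ' ')).length : Int)) by
    simp only [Prod.mk.injEq]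
    and_intros <;> first | trivial | (rw [hlen]; ring)]
  simp only [columnLoad]
  rw [show ((0 : Int), (0 : Int), (0 : Int), (0 : Int))
      = ((0 : Int), (0 : Int), (0 : Int),
        (arr.length : Int) - ((arr.map (fun r => r.toList.getD j ' ')).length : Int)) by
    simp only [Prod.mk.injEq]
    and_intros <;> first | trivial | (rw [hlen]; ring)]
  rw [colMain _ _ 0 0 0 res, segLoad_zero]
  ring

-- ===== VERDICT (by name: the statement is the Claim_ definition above) =====
theorem press_spec : Claim_equal_press := by
  intro arr _
  unfold Spec_press press press_alt
  rw [zipStar_eq]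
  have hw : minLen ((arr.reverse).map (fun s => s.toList)) = minLen (arr.map (fun s => s.toList)) := by
    rw [List.map_reverse, minLen_reverse]
  rw [hw]
  simp only [pressReverse, List.map_map, List.map_reverse, List.reverse_reverse,
    Function.comp_def]
  rw [List.foldl_map]
  refine List.foldl_ext _ _ 0 ?_
  intro a j _
  exact colEq arr a j
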